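-- pv_equiv track=rewrite | github.com/p0s/computer-bild-spiele-spiele-liste | scripts/build_enriched_release.py | derive_entity_type
-- ===== SOURCE A (Python) =====
-- def derive_entity_type(instance_labels: list[str]) -> str:
--     lowered = [label.casefold() for label in instance_labels]
--     if any("expansion" in label or "downloadable content" in label for label in lowered):
--         return "expansion"
--     if any("compilation" in label for label in lowered):
--         return "compilation"
--     if any("software" in label or "application" in label or "utility" in label for label in lowered):
--         return "tool"
--     if any("video game" in label or "computer game" in label or "videospiel" in label for label in lowered):
--         return "game"
--     return "unknown"
-- ===== SOURCE B (Python) =====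
-- NAMES = ["expansion", "compilation", "tool", "game", "unknown"]
--
-- # flat keyword -> priority rank table (0 = highest priority)
-- KEYWORD_RANK = [
--     ("expansion", 0), ("downloadable content", 0),
--     ("compilation", 1),
--     ("software", 2), ("application", 2), ("utility", 2),
--     ("video game", 3), ("computer game", 3), ("videospiel", 3),
-- ]
--
--
-- def _rank(low: str) -> int:
--     r = 4
--     for kw, rank in KEYWORD_RANK:
--         if kw in low:
--             r = min(r, rank)
--     return r
--
--
-- def derive_entity_type(instance_labels: list[str]) -> str:
--     best = 4
--     for label in instance_labels:
--         best = min(best, _rank(label.casefold()))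
--     return NAMES[best]
-- ===== Notes on version B (the rewrite author's own statement) =====
-- stated objective: alternative
-- what changed: Replaces A's four sequential per-category any() scans and early returns with a flat keyword-to-priority-rank table: each label is mapped to its best (minimum) rank, a single min-reduction over labels yields the global best rank, and the result is an index lookup into the name table.
import Mathlib
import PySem

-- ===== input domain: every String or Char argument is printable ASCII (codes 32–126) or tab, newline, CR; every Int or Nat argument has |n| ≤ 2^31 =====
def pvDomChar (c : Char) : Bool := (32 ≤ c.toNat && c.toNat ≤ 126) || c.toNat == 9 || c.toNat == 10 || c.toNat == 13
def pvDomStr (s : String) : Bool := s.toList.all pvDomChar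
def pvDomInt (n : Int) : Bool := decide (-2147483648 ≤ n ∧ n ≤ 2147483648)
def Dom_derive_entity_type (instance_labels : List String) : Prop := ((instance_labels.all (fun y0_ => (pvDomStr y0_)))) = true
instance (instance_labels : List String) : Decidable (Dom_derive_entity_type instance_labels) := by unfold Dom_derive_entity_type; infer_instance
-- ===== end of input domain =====

-- B replaces A's four per-category any() scans and early returns with a flat keyword→priority-rank table, a min-rank reduction over the labels, and a final index lookup into the name table (alternative decomposition, same cost).


-- ===== PORT A =====
def derive_entity_type (instance_labels : List String) : String :=
  let lowered := instance_labels.map (fun label => PySem.Str.lower label)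
  if lowered.any (fun label => PySem.Str.isIn "expansion" label || PySem.Str.isIn "downloadable content" label) then "expansion"
  else if lowered.any (fun label => PySem.Str.isIn "compilation" label) then "compilation"
  else if lowered.any (fun label => PySem.Str.isIn "software" label || PySem.Str.isIn "application" label || PySem.Str.isIn "utility" label) then "tool"
  else if lowered.any (fun label => PySem.Str.isIn "video game" label || PySem.Str.isIn "computer game" label || PySem.Str.isIn "videospiel" label) then "game"
  else "unknown"

-- ===== PORT B =====
-- Source B's NAMES and flat keyword→rank table
def pvNames : List String := ["expansion", "compilation", "tool", "game", "unknown"]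
def pvKeywordRank : List (String × Nat) :=
  [("expansion", 0), ("downloadable content", 0),
   ("compilation", 1),
   ("software", 2), ("application", 2), ("utility", 2),
   ("video game", 3), ("computer game", 3), ("videospiel", 3)]

-- Source B's _rank: minimum rank among the keywords occurring in the label
def pvRankOf (low : String) : Nat :=
  pvKeywordRank.foldl (fun r kr => if PySem.Str.isIn kr.1 low then min r kr.2 else r) 4

def derive_entity_type_alt (instance_labels : List String) : String :=
  let best := instance_labels.foldl (fun b label => min b (pvRankOf (PySem.Str.lower label))) 4
  -- NAMES[best]: best ≤ 4 always, so the index is in range and the getD default is unreachable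
  (PySem.List.pyGet? pvNames (Int.ofNat best)).getD ""

-- ===== PRECONDITION & SPEC =====
def Spec_derive_entity_type (instance_labels : List String) (out : String) : Prop := out = derive_entity_type_alt instance_labels
instance (instance_labels : List String) (out : String) : Decidable (Spec_derive_entity_type instance_labels out) := by unfold Spec_derive_entity_type; infer_instance

-- ===== CLAIM (what is proved, stated in full; the proofs are below) =====
def Claim_equal_derive_entity_type : Prop := ∀ (instance_labels : List String), Dom_derive_entity_type instance_labels → Spec_derive_entity_type instance_labels (derive_entity_type instance_labels)

-- ===== LEMMAS AND PROOFS =====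

-- the keyword fold stays ≤ i iff the seed is, or some matching keyword has rank ≤ i
theorem pv_rankFold_le_iff (low : String) (L : List (String × Nat)) (a i : Nat) :
    (L.foldl (fun r kr => if PySem.Str.isIn kr.1 low then min r kr.2 else r) a ≤ i)
    ↔ a ≤ i ∨ ∃ kr ∈ L, PySem.Str.isIn kr.1 low = true ∧ kr.2 ≤ i := by
  induction L generalizing a with
  | nil => simp
  | cons kr L ih =>
    simp only [List.foldl_cons, List.mem_cons]
    by_cases h : PySem.Str.isIn kr.1 low = true
    · rw [if_pos h, ih]
      constructor
      · rintro (hm | ⟨x, hx, hs, hr⟩)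
        · rcases min_le_iff.mp hm with h1 | h1
          · exact Or.inl h1
          · exact Or.inr ⟨kr, Or.inl rfl, h, h1⟩
        · exact Or.inr ⟨x, Or.inr hx, hs, hr⟩
      · rintro (h1 | ⟨x, (rfl | hx), hs, hr⟩)
        · exact Or.inl (le_trans (min_le_left _ _) h1)
        · exact Or.inl (le_trans (min_le_right _ _) hr)
        · exact Or.inr ⟨x, hx, hs, hr⟩
    · rw [if_neg h, ih]
      constructor
      · rintro (h1 | ⟨x, hx, hs, hr⟩)
        · exact Or.inl h1
        · exact Or.inr ⟨x, Or.inr hx, hs, hr⟩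
      · rintro (h1 | ⟨x, (rfl | hx), hs, hr⟩)
        · exact Or.inl h1
        · exact absurd hs h
        · exact Or.inr ⟨x, hx, hs, hr⟩

-- the label fold stays ≤ i iff the seed is, or some label has rank ≤ i
theorem pv_minFold_le_iff (labels : List String) (a i : Nat) :
    (labels.foldl (fun b l => min b (pvRankOf (PySem.Str.lower l))) a ≤ i)
    ↔ a ≤ i ∨ ∃ l ∈ labels, pvRankOf (PySem.Str.lower l) ≤ i := by
  induction labels generalizing a with
  | nil => simp
  | cons l ls ih =>
    simp only [List.foldl_cons, List.mem_cons, ih, min_le_iff]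
    constructor
    · rintro ((h1 | h1) | ⟨x, hx, hr⟩)
      · exact Or.inl h1
      · exact Or.inr ⟨l, Or.inl rfl, h1⟩
      · exact Or.inr ⟨x, Or.inr hx, hr⟩
    · rintro (h1 | ⟨x, (rfl | hx), hr⟩)
      · exact Or.inl (Or.inl h1)
      · exact Or.inl (Or.inr hr)
      · exact Or.inr ⟨x, hx, hr⟩

-- per-label rank thresholds, read off the literal keyword table
theorem pv_rank_le_0 (low : String) :
    pvRankOf low ≤ 0 ↔ PySem.Str.isIn "expansion" low = true ∨ PySem.Str.isIn "downloadable content" low = true := by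
  rw [pvRankOf, pv_rankFold_le_iff]
  simp [pvKeywordRank]

theorem pv_rank_le_1 (low : String) :
    pvRankOf low ≤ 1 ↔ PySem.Str.isIn "expansion" low = true ∨ PySem.Str.isIn "downloadable content" low = true
      ∨ PySem.Str.isIn "compilation" low = true := by
  rw [pvRankOf, pv_rankFold_le_iff]
  simp [pvKeywordRank]

theorem pv_rank_le_2 (low : String) :
    pvRankOf low ≤ 2 ↔ PySem.Str.isIn "expansion" low = true ∨ PySem.Str.isIn "downloadable content" low = true
      ∨ PySem.Str.isIn "compilation" low = true
      ∨ PySem.Str.isIn "software" low = true ∨ PySem.Str.isIn "application" low = true ∨ PySem.Str.isIn "utility" low = true := by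
  rw [pvRankOf, pv_rankFold_le_iff]
  simp [pvKeywordRank]

theorem pv_rank_le_3 (low : String) :
    pvRankOf low ≤ 3 ↔ PySem.Str.isIn "expansion" low = true ∨ PySem.Str.isIn "downloadable content" low = true
      ∨ PySem.Str.isIn "compilation" low = true
      ∨ PySem.Str.isIn "software" low = true ∨ PySem.Str.isIn "application" low = true ∨ PySem.Str.isIn "utility" low = true
      ∨ PySem.Str.isIn "video game" low = true ∨ PySem.Str.isIn "computer game" low = true ∨ PySem.Str.isIn "videospiel" low = true := by
  rw [pvRankOf, pv_rankFold_le_iff]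
  simp [pvKeywordRank]

-- ===== VERDICT (by name: the statement is the Claim_ definition above) =====
set_option maxHeartbeats 1000000 in
theorem derive_entity_type_spec : Claim_equal_derive_entity_type := by
  intro labels _
  show derive_entity_type labels = derive_entity_type_alt labels
  unfold derive_entity_type derive_entity_type_alt
  simp only [List.any_map, Function.comp_def]
  generalize hM : labels.foldl (fun b l => min b (pvRankOf (PySem.Str.lower l))) 4 = M
  have hle : ∀ i : Nat, M ≤ i ↔ 4 ≤ i ∨ ∃ l ∈ labels, pvRankOf (PySem.Str.lower l) ≤ i := by
    intro i; rw [← hM, pv_minFold_le_iff]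
  have h4 : M ≤ 4 := (hle 4).mpr (Or.inl le_rfl)
  by_cases e : (labels.any fun l => PySem.Str.isIn "expansion" (PySem.Str.lower l) || PySem.Str.isIn "downloadable content" (PySem.Str.lower l)) = true
  · rw [if_pos e]
    have e' : ∃ l ∈ labels, PySem.Str.isIn "expansion" (PySem.Str.lower l) = true ∨ PySem.Str.isIn "downloadable content" (PySem.Str.lower l) = true := by
      simpa only [List.any_eq_true, Bool.or_eq_true] using e
    obtain ⟨l, hl, hc⟩ := e'
    have : M = 0 := Nat.le_zero.mp ((hle 0).mpr (Or.inr ⟨l, hl, (pv_rank_le_0 _).mpr hc⟩))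
    rw [this]; decide
  · rw [if_neg e]
    have e' : ∀ l ∈ labels, ¬(PySem.Str.isIn "expansion" (PySem.Str.lower l) = true ∨ PySem.Str.isIn "downloadable content" (PySem.Str.lower l) = true) := by
      simpa only [List.any_eq_true, Bool.or_eq_true, not_exists, not_and, not_or] using e
    have ne0 : ¬ M ≤ 0 := by
      intro h; rcases (hle 0).mp h with h | ⟨l, hl, hr⟩
      · omega
      · exact e' l hl ((pv_rank_le_0 _).mp hr)
    by_cases c : (labels.any fun l => PySem.Str.isIn "compilation" (PySem.Str.lower l)) = true
    · rw [if_pos c]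
      obtain ⟨l, hl, hc⟩ := List.any_eq_true.mp c
      have h1 : M ≤ 1 := (hle 1).mpr (Or.inr ⟨l, hl, (pv_rank_le_1 _).mpr (Or.inr (Or.inr hc))⟩)
      have : M = 1 := by omega
      rw [this]; decide
    · rw [if_neg c]
      have c' : ∀ l ∈ labels, ¬ PySem.Str.isIn "compilation" (PySem.Str.lower l) = true := by
        simpa only [List.any_eq_true, not_exists, not_and] using c
      have ne1 : ¬ M ≤ 1 := by
        intro h; rcases (hle 1).mp h with h | ⟨l, hl, hr⟩
        · omega
        · rcases (pv_rank_le_1 _).mp hr with h' | h' | h'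
          · exact e' l hl (Or.inl h')
          · exact e' l hl (Or.inr h')
          · exact c' l hl h'
      by_cases t : (labels.any fun l => PySem.Str.isIn "software" (PySem.Str.lower l) || PySem.Str.isIn "application" (PySem.Str.lower l) || PySem.Str.isIn "utility" (PySem.Str.lower l)) = true
      · rw [if_pos t]
        have t' : ∃ l ∈ labels, (PySem.Str.isIn "software" (PySem.Str.lower l) = true ∨ PySem.Str.isIn "application" (PySem.Str.lower l) = true) ∨ PySem.Str.isIn "utility" (PySem.Str.lower l) = true := by
          simpa only [List.any_eq_true, Bool.or_eq_true] using t
        obtain ⟨l, hl, hc⟩ := t'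
        have h2 : M ≤ 2 := (hle 2).mpr (Or.inr ⟨l, hl, (pv_rank_le_2 _).mpr (by
          rcases hc with (h | h) | h
          · exact Or.inr (Or.inr (Or.inr (Or.inl h)))
          · exact Or.inr (Or.inr (Or.inr (Or.inr (Or.inl h))))
          · exact Or.inr (Or.inr (Or.inr (Or.inr (Or.inr h)))))⟩)
        have : M = 2 := by omega
        rw [this]; decide
      · rw [if_neg t]
        have t' : ∀ l ∈ labels, ¬((PySem.Str.isIn "software" (PySem.Str.lower l) = true ∨ PySem.Str.isIn "application" (PySem.Str.lower l) = true) ∨ PySem.Str.isIn "utility" (PySem.Str.lower l) = true) := by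
          simpa only [List.any_eq_true, Bool.or_eq_true, not_exists, not_and] using t
        have ne2 : ¬ M ≤ 2 := by
          intro h; rcases (hle 2).mp h with h | ⟨l, hl, hr⟩
          · omega
          · rcases (pv_rank_le_2 _).mp hr with h' | h' | h' | h' | h' | h'
            · exact e' l hl (Or.inl h')
            · exact e' l hl (Or.inr h')
            · exact c' l hl h'
            · exact t' l hl (Or.inl (Or.inl h'))
            · exact t' l hl (Or.inl (Or.inr h'))
            · exact t' l hl (Or.inr h')
        by_cases g : (labels.any fun l => PySem.Str.isIn "video game" (PySem.Str.lower l) || PySem.Str.isIn "computer game" (PySem.Str.lower l) || PySem.Str.isIn "videospiel" (PySem.Str.lower l)) = true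
        · rw [if_pos g]
          have g' : ∃ l ∈ labels, (PySem.Str.isIn "video game" (PySem.Str.lower l) = true ∨ PySem.Str.isIn "computer game" (PySem.Str.lower l) = true) ∨ PySem.Str.isIn "videospiel" (PySem.Str.lower l) = true := by
            simpa only [List.any_eq_true, Bool.or_eq_true] using g
          obtain ⟨l, hl, hc⟩ := g'
          have h3 : M ≤ 3 := (hle 3).mpr (Or.inr ⟨l, hl, (pv_rank_le_3 _).mpr (by
            rcases hc with (h | h) | h
            · exact Or.inr (Or.inr (Or.inr (Or.inr (Or.inr (Or.inr (Or.inl h))))))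
            · exact Or.inr (Or.inr (Or.inr (Or.inr (Or.inr (Or.inr (Or.inr (Or.inl h)))))))
            · exact Or.inr (Or.inr (Or.inr (Or.inr (Or.inr (Or.inr (Or.inr (Or.inr h))))))))⟩)
          have : M = 3 := by omega
          rw [this]; decide
        · rw [if_neg g]
          have g' : ∀ l ∈ labels, ¬((PySem.Str.isIn "video game" (PySem.Str.lower l) = true ∨ PySem.Str.isIn "computer game" (PySem.Str.lower l) = true) ∨ PySem.Str.isIn "videospiel" (PySem.Str.lower l) = true) := by
            simpa only [List.any_eq_true, Bool.or_eq_true, not_exists, not_and] using g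
          have ne3 : ¬ M ≤ 3 := by
            intro h; rcases (hle 3).mp h with h | ⟨l, hl, hr⟩
            · omega
            · rcases (pv_rank_le_3 _).mp hr with h' | h' | h' | h' | h' | h' | h' | h' | h'
              · exact e' l hl (Or.inl h')
              · exact e' l hl (Or.inr h')
              · exact c' l hl h'
              · exact t' l hl (Or.inl (Or.inl h'))
              · exact t' l hl (Or.inl (Or.inr h'))
              · exact t' l hl (Or.inr h')
              · exact g' l hl (Or.inl (Or.inl h'))
              · exact g' l hl (Or.inl (Or.inr h'))
              · exact g' l hl (Or.inr h')
          have : M = 4 := by omega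
          rw [this]; decide
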